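-- pv_equiv track=rewrite | github.com/hawkstwelve/twm | backend/app/services/builder/cog_writer.py | _overview_levels
-- ===== SOURCE A (Python) =====
-- def _overview_levels(height: int, width: int) -> list[int]:
--     """Compute overview levels (powers of 2), including small grids.
--
--     Contract requires internal overviews. For compact domains (e.g. GFS PNW),
--     still emit at least a 2x overview when possible.
--     """
--     max_dim = max(height, width)
--     if max_dim < 2:
--         return []
--
--     levels = []
--     factor = 2
--     while max_dim // factor >= 128:
--         levels.append(factor)
--         factor *= 2
--
--     # Always have at least one overview level for any grid that can be downsampled.
--     if not levels:
--         levels.append(2)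
--     return levels
-- ===== SOURCE B (Python) =====
-- def _overview_levels(height: int, width: int) -> list[int]:
--     """Closed-form: the loop's factors are 2**i for 128*2**i <= max_dim,
--     i.e. 2**i <= max_dim // 128; the largest such i is (max_dim//128).bit_length() - 1."""
--     max_dim = max(height, width)
--     if max_dim < 2:
--         return []
--     n = (max_dim // 128).bit_length() - 1
--     levels = [2 ** i for i in range(1, n + 1)]
--     return levels if levels else [2]
-- ===== Notes on version B (the rewrite author's own statement) =====
-- stated objective: alternative
-- what changed: Replaces the doubling while-loop by a closed form: the number of levels is computed from (max_dim//128).bit_length() and the levels are generated as a power-of-two comprehension.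
import Mathlib
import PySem

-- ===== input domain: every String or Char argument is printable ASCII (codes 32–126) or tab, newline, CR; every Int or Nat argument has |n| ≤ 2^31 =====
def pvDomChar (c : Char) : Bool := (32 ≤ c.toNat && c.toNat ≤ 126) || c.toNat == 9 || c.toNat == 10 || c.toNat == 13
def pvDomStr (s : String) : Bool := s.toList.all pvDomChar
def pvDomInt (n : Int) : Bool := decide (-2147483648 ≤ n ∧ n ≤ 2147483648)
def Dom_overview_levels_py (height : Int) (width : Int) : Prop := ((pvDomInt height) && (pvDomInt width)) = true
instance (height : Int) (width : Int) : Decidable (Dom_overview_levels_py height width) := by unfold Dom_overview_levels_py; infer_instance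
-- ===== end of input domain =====

-- B replaces A's doubling while-loop by a closed form derived from (max_dim//128).bit_length(); same return value, similar cost.
-- ===== PORT A =====
-- the while-loop of A; the fuel only makes the recursion total and is proved sufficient on Dom
def pvLoopA (fuel : Nat) (max_dim : Int) (factor : Int) (levels : List Int) : List Int :=
  match fuel with
  | 0 => levels
  | fuel + 1 =>
    if PySem.Int.floordiv max_dim factor ≥ 128 then
      pvLoopA fuel max_dim (factor * 2) (levels ++ [factor])
    else
      levels

def overview_levels_py (height : Int) (width : Int) : List Int :=
  let max_dim := max height width
  if max_dim < 2 then []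
  else
    let levels := pvLoopA 64 max_dim 2 []
    if levels = [] then [2] else levels

-- ===== PORT B =====
def overview_levels_py_alt (height : Int) (width : Int) : List Int :=
  let max_dim := max height width
  if max_dim < 2 then []
  else
    let n : Int := (PySem.Int.bitLength (PySem.Int.floordiv max_dim 128) : Int) - 1
    let levels := (PySem.List.pyRange 1 (n + 1) 1).map (fun i => (2 : Int) ^ i.toNat)
    if levels = [] then [2] else levels

-- ===== PRECONDITION & SPEC =====
def Spec_overview_levels_py (height : Int) (width : Int) (out : List Int) : Prop := out = overview_levels_py_alt height width
instance (height : Int) (width : Int) (out : List Int) : Decidable (Spec_overview_levels_py height width out) := by unfold Spec_overview_levels_py; infer_instance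

-- ===== CLAIM (what is proved, stated in full; the proofs are below) =====
def Claim_equal_overview_levels_py : Prop := ∀ (height : Int) (width : Int), Dom_overview_levels_py height width → Spec_overview_levels_py height width (overview_levels_py height width)

-- ===== LEMMAS AND PROOFS =====

-- loop guard: max_dim // 2^(j+1) >= 128  ↔  2^(j+1) <= max_dim // 128
theorem pv_cond_iff (m : Int) (j : Nat) :
    (128 ≤ PySem.Int.floordiv m ((2:Int)^(j+1)) ↔ (2:Int)^(j+1) ≤ PySem.Int.floordiv m 128) := by
  rw [PySem.Int.le_floordiv_iff_mul_le (show (0:Int) < (2:Int)^(j+1) by positivity),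
      PySem.Int.le_floordiv_iff_mul_le (show (0:Int) < 128 by norm_num)]
  constructor <;> intro h <;> linarith [h]

-- power comparison against bitLength, for 0 ≤ q
theorem pv_pow_le_iff (q : Int) (hq : 0 ≤ q) (j : Nat) :
    ((2:Int)^(j+1) ≤ q ↔ j + 2 ≤ PySem.Int.bitLength q) := by
  constructor
  · intro h
    have hq0 : q ≠ 0 := by
      intro h0; rw [h0] at h
      have : (0:Int) < (2:Int)^(j+1) := by positivity
      omega
    have h1 := PySem.Int.lt_two_pow_bitLength q
    have hcast : (q.natAbs : Int) = q := Int.natAbs_of_nonneg hq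
    have h2 : (2:Nat)^(j+1) ≤ q.natAbs := by
      have h2' : ((2:Nat)^(j+1) : Int) ≤ (q.natAbs : Int) := by
        rw [hcast]; exact_mod_cast h
      exact_mod_cast h2'
    have : (2:Nat)^(j+1) < 2 ^ PySem.Int.bitLength q := lt_of_le_of_lt h2 h1
    have := (Nat.pow_lt_pow_iff_right (by norm_num : 1 < 2)).mp this
    omega
  · intro h
    have hq0 : q ≠ 0 := by
      intro h0
      rw [h0, PySem.Int.bitLength_zero] at h
      omega
    have h2 := PySem.Int.two_pow_bitLength_le q hq0
    have h3 : (2:Nat)^(j+1) ≤ 2 ^ (PySem.Int.bitLength q - 1) :=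
      Nat.pow_le_pow_right (by norm_num) (by omega)
    have : (2:Nat)^(j+1) ≤ q.natAbs := le_trans h3 h2
    have hcast : (q.natAbs : Int) = q := Int.natAbs_of_nonneg hq
    have h4 : ((2:Nat)^(j+1) : Int) ≤ (q.natAbs : Int) := by exact_mod_cast this
    rw [hcast] at h4
    exact_mod_cast h4

-- characterisation of A's while-loop (factor = 2^(j+1), enough fuel)
theorem pvLoopA_eq (fuel : Nat) : ∀ (j : Nat) (m : Int) (acc : List Int),
    0 ≤ PySem.Int.floordiv m 128 →
    PySem.Int.bitLength (PySem.Int.floordiv m 128) ≤ j + fuel →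
    pvLoopA fuel m ((2:Int)^(j+1)) acc =
      acc ++ (List.range' (j+1) (PySem.Int.bitLength (PySem.Int.floordiv m 128) - 1 - j)).map
        (fun i => (2:Int)^i) := by
  induction fuel with
  | zero =>
    intro j m acc hq hfuel
    have h0 : PySem.Int.bitLength (PySem.Int.floordiv m 128) - 1 - j = 0 := by omega
    rw [h0]
    simp [pvLoopA]
  | succ fuel ih =>
    intro j m acc hq hfuel
    rw [pvLoopA]
    by_cases hc : 128 ≤ PySem.Int.floordiv m ((2:Int)^(j+1))
    · have hL : j + 2 ≤ PySem.Int.bitLength (PySem.Int.floordiv m 128) :=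
        (pv_pow_le_iff _ hq j).mp ((pv_cond_iff m j).mp hc)
      rw [if_pos hc]
      have hpow : (2:Int)^(j+1) * 2 = (2:Int)^(j+1+1) := by ring
      rw [hpow, ih (j+1) m (acc ++ [(2:Int)^(j+1)]) hq (by omega)]
      have hn : PySem.Int.bitLength (PySem.Int.floordiv m 128) - 1 - j =
          (PySem.Int.bitLength (PySem.Int.floordiv m 128) - 1 - (j+1)) + 1 := by omega
      rw [hn, List.range'_succ]
      simp
    · have hL : PySem.Int.bitLength (PySem.Int.floordiv m 128) ≤ j + 1 := by
        by_contra hcon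
        exact hc ((pv_cond_iff m j).mpr ((pv_pow_le_iff _ hq j).mpr (by omega)))
      rw [if_neg hc]
      have h0 : PySem.Int.bitLength (PySem.Int.floordiv m 128) - 1 - j = 0 := by omega
      rw [h0]
      simp

-- ===== VERDICT (by name: the statement is the Claim_ definition above) =====
theorem overview_levels_py_spec : Claim_equal_overview_levels_py := by
  intro height width hdom
  unfold Spec_overview_levels_py overview_levels_py overview_levels_py_alt
  simp only [Dom_overview_levels_py, pvDomInt, Bool.and_eq_true, decide_eq_true_eq] at hdom
  set m := max height width with hm
  by_cases hlt : m < 2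
  · rw [if_pos hlt, if_pos hlt]
  · rw [if_neg hlt, if_neg hlt]
    push Not at hlt
    have hmle : m ≤ 2147483648 := max_le hdom.1.2 hdom.2.2
    have hq0 : 0 ≤ PySem.Int.floordiv m 128 := by
      rw [PySem.Int.le_floordiv_iff_mul_le (show (0:Int) < 128 by norm_num)]
      linarith
    have hqle : PySem.Int.floordiv m 128 < 16777217 := by
      rw [PySem.Int.floordiv_lt_iff_lt_mul (show (0:Int) < 128 by norm_num)]
      linarith
    set L := PySem.Int.bitLength (PySem.Int.floordiv m 128) with hL
    have hL64 : L ≤ 64 := by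
      by_contra hc
      have hne : PySem.Int.floordiv m 128 ≠ 0 := by
        intro h0
        rw [hL, h0, PySem.Int.bitLength_zero] at hc
        omega
      have hlow := PySem.Int.two_pow_bitLength_le _ hne
      have hnat : (PySem.Int.floordiv m 128).natAbs < 16777217 := by
        have := Int.natAbs_of_nonneg hq0
        omega
      have hbig : (2:Nat)^64 ≤ 2^(L-1) := Nat.pow_le_pow_right (by norm_num) (by omega)
      rw [← hL] at hlow
      have : (2:Nat)^64 ≤ (PySem.Int.floordiv m 128).natAbs := le_trans hbig hlow
      norm_num at this
      omega
    have hloop := pvLoopA_eq 64 0 m [] hq0 (by omega)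
    rw [show ((2:Int)^(0+1)) = 2 by norm_num] at hloop
    rw [← hL] at hloop
    rw [hloop]
    have hBlist : (PySem.List.pyRange 1 ((L:Int) - 1 + 1) 1).map (fun i : Int => (2:Int) ^ i.toNat)
        = (List.range' 1 (L - 1 - 0)).map (fun i : Nat => (2:Int)^i) := by
      rw [show ((L:Int) - 1 + 1) = (L:Int) by ring, PySem.List.pyRange_one,
        List.range'_eq_map_range]
      simp only [List.map_map]
      rw [show ((L:Int) - 1).toNat = L - 1 - 0 by omega]
      apply List.map_congr_left
      intro k _
      simp only [Function.comp_apply]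
      have hk : ((1:Int) + k).toNat = 1 + k := by omega
      rw [hk]
    simp only [List.nil_append, hBlist]
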